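-- pv_equiv track=rewrite | github.com/Jij-Inc/Qamomile | qamomile/circuit/transpiler/passes/analyze.py | _depends_on_measurement
-- ===== SOURCE A (Python) =====
-- def _depends_on_measurement(
--
--     value_uuid: str,
--     dependency_graph: dict[str, set[str]],
--     measurement_uuids: set[str],
--     parameter_uuids: set[str],
--     derived_from_measurement: set[str],
-- ) -> bool:
--     """Check if a value transitively depends on a measurement result.
--
--     Returns True if there's a dependency path to a measurement
--     that doesn't go through a parameter.
--     """
--     # Direct measurement dependency
--     if value_uuid in measurement_uuids:
--         return True
--
--     # Derived from measurement
--     if value_uuid in derived_from_measurement: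
--         return True
--
--     # Parameters are OK
--     if value_uuid in parameter_uuids:
--         return False
--
--     # Check transitive dependencies
--     visited: set[str] = set()
--
--     def dfs(uuid: str) -> bool:
--         if uuid in visited:
--             return False
--         visited.add(uuid)
--
--         # Direct measurement
--         if uuid in measurement_uuids:
--             return True
--
--         # Parameters are OK
--         if uuid in parameter_uuids:
--             return False
--
--         # Check dependencies
--         deps = dependency_graph.get(uuid, set())
--         return any(dfs(dep) for dep in deps)
--
--     return dfs(value_uuid)
-- ===== SOURCE B (Python) =====
-- def _depends_on_measurement(
--     value_uuid,
--     dependency_graph,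
--     measurement_uuids,
--     parameter_uuids,
--     derived_from_measurement,
-- ):
--     # Same three top-level guards as the original; derived_from_measurement is
--     # (as in the original) checked only for the starting value, never inside
--     # the traversal.
--     if value_uuid in measurement_uuids:
--         return True
--     if value_uuid in derived_from_measurement:
--         return True
--     if value_uuid in parameter_uuids:
--         return False
--
--     # Iterative DFS with an explicit stack instead of recursion.
--     stack = [value_uuid]
--     visited = set()
--     while stack:
--         uuid = stack.pop()
--         if uuid in visited:
--             continue
--         visited.add(uuid)
--         if uuid in measurement_uuids:
--             return True
--         if uuid in parameter_uuids:
--             continue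
--         stack.extend(dependency_graph.get(uuid, ()))
--     return False
-- ===== Notes on version B (the rewrite author's own statement) =====
-- stated objective: alternative
-- what changed: Replaces the recursive closure-based DFS (with any() over a generator) by an iterative explicit-stack worklist traversal with a visited set; no recursion, so no Python recursion-depth limit on deep graphs.
import Mathlib
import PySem

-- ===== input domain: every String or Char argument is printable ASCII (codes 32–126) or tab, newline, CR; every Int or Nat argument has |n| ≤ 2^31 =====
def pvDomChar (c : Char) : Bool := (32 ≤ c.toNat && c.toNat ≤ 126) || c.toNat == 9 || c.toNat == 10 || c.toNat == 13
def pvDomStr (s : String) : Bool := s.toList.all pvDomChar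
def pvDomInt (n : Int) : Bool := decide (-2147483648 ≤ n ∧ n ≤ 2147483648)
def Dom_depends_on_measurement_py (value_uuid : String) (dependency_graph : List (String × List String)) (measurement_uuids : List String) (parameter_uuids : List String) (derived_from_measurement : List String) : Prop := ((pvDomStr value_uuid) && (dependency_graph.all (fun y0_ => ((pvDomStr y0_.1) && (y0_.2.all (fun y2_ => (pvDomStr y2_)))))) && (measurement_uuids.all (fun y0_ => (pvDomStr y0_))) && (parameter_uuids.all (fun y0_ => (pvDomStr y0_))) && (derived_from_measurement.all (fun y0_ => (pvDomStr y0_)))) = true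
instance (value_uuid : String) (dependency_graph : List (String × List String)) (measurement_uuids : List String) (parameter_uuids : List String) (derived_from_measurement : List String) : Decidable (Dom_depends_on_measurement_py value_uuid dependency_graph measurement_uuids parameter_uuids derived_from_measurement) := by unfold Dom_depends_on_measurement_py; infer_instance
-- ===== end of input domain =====

-- B replaces A's recursive closure DFS by an iterative explicit-stack worklist traversal
-- (alternative decomposition, same result proved equal on all inputs).

-- Shared plumbing: dict.get(uuid, set()) as first-match lookup, and the measure used
-- only for termination: the number of universe nodes not yet visited.
def pvGetDeps (g : List (String × List String)) (u : String) : List String :=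
  ((g.find? (fun p => p.1 == u)).map Prod.snd).getD []

def pvUniv (value_uuid : String) (g : List (String × List String)) : List String :=
  value_uuid :: g.flatMap (fun p => p.1 :: p.2)

def pvUnvisited (univ visited : List String) : Nat :=
  (univ.filter (fun x => !(visited.contains x))).length

-- termination helper lemmas (cited by the ports' decreasing_by)
theorem pvFilter_len_le {α : Type} (p q : α → Bool) (l : List α)
    (h : ∀ x, p x = true → q x = true) :
    (l.filter p).length ≤ (l.filter q).length := by
  induction l with
  | nil => simp
  | cons a l ih =>
    cases hp : p a with
    | true => simp [hp, h a hp]; omega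
    | false => cases hq : q a <;> simp [hp, hq] <;> omega

theorem pvFilter_len_lt {α : Type} (p q : α → Bool) (l : List α) (u : α)
    (h : ∀ x, p x = true → q x = true) (hu : u ∈ l)
    (hpu : p u = false) (hqu : q u = true) :
    (l.filter p).length < (l.filter q).length := by
  induction l with
  | nil => simp at hu
  | cons a l ih =>
    rcases List.mem_cons.mp hu with rfl | hu
    · have := pvFilter_len_le p q l h
      simp [hpu, hqu]; omega
    · have h2 := ih hu
      cases hp : p a with
      | true => simp [hp, h a hp]; omega
      | false => cases hq : q a <;> simp [hp, hq] <;> omega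

theorem pvUnvisited_le (univ v w : List String) (h : ∀ x, x ∈ v → x ∈ w) :
    pvUnvisited univ w ≤ pvUnvisited univ v := by
  apply pvFilter_len_le
  intro x hx
  simp only [Bool.not_eq_true', List.contains_eq_mem, decide_eq_false_iff_not] at hx ⊢
  exact fun hm => hx (h x hm)

theorem pvUnvisited_lt (univ v : List String) (u : String) (hu : u ∈ univ) (hv : u ∉ v) :
    pvUnvisited univ (u :: v) < pvUnvisited univ v := by
  apply pvFilter_len_lt _ _ _ u _ hu
  · simp
  · simpa using hv
  · intro x hx
    simp only [Bool.not_eq_true', List.contains_eq_mem, decide_eq_false_iff_not,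
      List.mem_cons] at hx ⊢
    exact fun hm => hx (Or.inr hm)

-- ===== PORT A =====
-- A's inner `dfs` closure, with the shared mutable `visited` set threaded through
-- explicitly; `any(dfs(dep) for dep in deps)` becomes pvAnyDfs (short-circuiting
-- left-to-right scan). The `univ.contains uuid` test and the subset test in pvAnyDfs
-- are totality guards only: the top level always passes univ ⊇ every node that can
-- reach the traversal (and a node outside univ has no graph entry, so its deps are
-- empty and Python's any() over them is False, which is what the guard branch returns);
-- likewise the returned visited set always extends the input one.
mutual
def pvDfsA (univ : List String) (g : List (String × List String))
    (meas param : List String) (visited : List String) (uuid : String) :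
    Bool × List String :=
  if visited.contains uuid then (false, visited)
  else
    -- visited.add(uuid)
    if meas.contains uuid then (true, uuid :: visited)
    else if param.contains uuid then (false, uuid :: visited)
    else if h : univ.contains uuid then
      pvAnyDfs univ g meas param (uuid :: visited) (pvGetDeps g uuid)
    else (false, uuid :: visited)
termination_by (pvUnvisited univ visited, 0)
decreasing_by
  apply Prod.Lex.left
  exact pvUnvisited_lt univ visited uuid (by simpa using h) (by simpa using ‹¬ visited.contains uuid = true›)

def pvAnyDfs (univ : List String) (g : List (String × List String))
    (meas param : List String) (visited : List String) (deps : List String) :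
    Bool × List String :=
  match deps with
  | [] => (false, visited)
  | d :: ds =>
    let r := pvDfsA univ g meas param visited d
    if r.1 then (true, r.2)
    else if h : ∀ x, x ∈ visited → x ∈ r.2 then pvAnyDfs univ g meas param r.2 ds
    else (false, r.2)
termination_by (pvUnvisited univ visited, deps.length + 1)
decreasing_by
  · apply Prod.Lex.right; simp [List.length_cons]
  · have hle := pvUnvisited_le univ visited r.2 h
    rcases Nat.lt_or_ge (pvUnvisited univ r.2) (pvUnvisited univ visited) with hl | hg
    · exact Prod.Lex.left _ _ hl
    · have : pvUnvisited univ r.2 = pvUnvisited univ visited := by omega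
      rw [this]; apply Prod.Lex.right; simp [List.length_cons]
end

def depends_on_measurement_py (value_uuid : String) (dependency_graph : List (String × List String)) (measurement_uuids : List String) (parameter_uuids : List String) (derived_from_measurement : List String) : Bool :=
  if measurement_uuids.contains value_uuid then true
  else if derived_from_measurement.contains value_uuid then true
  else if parameter_uuids.contains value_uuid then false
  else
    (pvDfsA (pvUniv value_uuid dependency_graph) dependency_graph
      measurement_uuids parameter_uuids [] value_uuid).1

-- ===== PORT B =====
-- B's while-loop: pop the top of the stack, skip visited, mark, test, push deps.
-- The `univ.contains u` test is the same totality guard as in port A (a node outside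
-- univ has no graph entry, so extending the stack with its deps is extending with []).
def pvLoopB (univ : List String) (g : List (String × List String))
    (meas param : List String) (stack visited : List String) : Bool :=
  match stack with
  | [] => false
  | u :: rest =>
    if visited.contains u then pvLoopB univ g meas param rest visited
    else
      -- visited.add(u)
      if meas.contains u then true
      else if param.contains u then pvLoopB univ g meas param rest (u :: visited)
      else if h : univ.contains u then
        pvLoopB univ g meas param (pvGetDeps g u ++ rest) (u :: visited)
      else pvLoopB univ g meas param rest (u :: visited)
termination_by (pvUnvisited univ visited, stack.length)
decreasing_by
  · apply Prod.Lex.right; simp [List.length_cons]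
  · have hle := pvUnvisited_le univ visited (u :: visited)
      (fun x hx => List.mem_cons_of_mem _ hx)
    rcases Nat.lt_or_ge (pvUnvisited univ (u :: visited)) (pvUnvisited univ visited) with hl | hg
    · exact Prod.Lex.left _ _ hl
    · have : pvUnvisited univ (u :: visited) = pvUnvisited univ visited := by omega
      rw [this]; apply Prod.Lex.right; simp [List.length_cons]
  · apply Prod.Lex.left
    exact pvUnvisited_lt univ visited u (by simpa using h) (by simpa using ‹¬ visited.contains u = true›)
  · have hle := pvUnvisited_le univ visited (u :: visited)
      (fun x hx => List.mem_cons_of_mem _ hx)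
    rcases Nat.lt_or_ge (pvUnvisited univ (u :: visited)) (pvUnvisited univ visited) with hl | hg
    · exact Prod.Lex.left _ _ hl
    · have : pvUnvisited univ (u :: visited) = pvUnvisited univ visited := by omega
      rw [this]; apply Prod.Lex.right; simp [List.length_cons]

def depends_on_measurement_py_alt (value_uuid : String) (dependency_graph : List (String × List String)) (measurement_uuids : List String) (parameter_uuids : List String) (derived_from_measurement : List String) : Bool :=
  if measurement_uuids.contains value_uuid then true
  else if derived_from_measurement.contains value_uuid then true
  else if parameter_uuids.contains value_uuid then false
  else
    pvLoopB (pvUniv value_uuid dependency_graph) dependency_graph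
      measurement_uuids parameter_uuids [value_uuid] []

-- ===== PRECONDITION & SPEC =====
def Spec_depends_on_measurement_py (value_uuid : String) (dependency_graph : List (String × List String)) (measurement_uuids : List String) (parameter_uuids : List String) (derived_from_measurement : List String) (out : Bool) : Prop := out = depends_on_measurement_py_alt value_uuid dependency_graph measurement_uuids parameter_uuids derived_from_measurement
instance (value_uuid : String) (dependency_graph : List (String × List String)) (measurement_uuids : List String) (parameter_uuids : List String) (derived_from_measurement : List String) (out : Bool) : Decidable (Spec_depends_on_measurement_py value_uuid dependency_graph measurement_uuids parameter_uuids derived_from_measurement out) := by unfold Spec_depends_on_measurement_py; infer_instance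

-- ===== CLAIM (what is proved, stated in full; the proofs are below) =====
def Claim_equal_depends_on_measurement_py : Prop := ∀ (value_uuid : String) (dependency_graph : List (String × List String)) (measurement_uuids : List String) (parameter_uuids : List String) (derived_from_measurement : List String), Dom_depends_on_measurement_py value_uuid dependency_graph measurement_uuids parameter_uuids derived_from_measurement → Spec_depends_on_measurement_py value_uuid dependency_graph measurement_uuids parameter_uuids derived_from_measurement (depends_on_measurement_py value_uuid dependency_graph measurement_uuids parameter_uuids derived_from_measurement)

-- ===== LEMMAS AND PROOFS =====

-- the traversal only extends the visited set
theorem pvAnyDfs_subset (univ : List String) (g : List (String × List String))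
    (meas param : List String) :
    ∀ (k : Nat) (visited deps : List String), pvUnvisited univ visited < k →
      ∀ x, x ∈ visited → x ∈ (pvAnyDfs univ g meas param visited deps).2 := by
  intro k
  induction k using Nat.strong_induction_on with
  | _ k IH =>
  have hdfs : ∀ visited uuid, pvUnvisited univ visited < k →
      ∀ x, x ∈ visited → x ∈ (pvDfsA univ g meas param visited uuid).2 := by
    intro visited uuid hk x hx
    rw [pvDfsA]
    simp only [List.contains_eq_mem, decide_eq_true_eq]
    by_cases h1 : uuid ∈ visited
    · rw [if_pos h1]; exact hx
    · rw [if_neg h1]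
      by_cases h2 : uuid ∈ meas
      · rw [if_pos h2]; exact List.mem_cons_of_mem _ hx
      · rw [if_neg h2]
        by_cases h3 : uuid ∈ param
        · rw [if_pos h3]; exact List.mem_cons_of_mem _ hx
        · rw [if_neg h3]
          by_cases h4 : uuid ∈ univ
          · rw [dif_pos h4]
            exact IH (pvUnvisited univ visited) hk (uuid :: visited) _
              (pvUnvisited_lt univ visited uuid h4 h1) x (List.mem_cons_of_mem _ hx)
          · rw [dif_neg h4]; exact List.mem_cons_of_mem _ hx
  intro visited deps
  induction deps generalizing visited with
  | nil => intro hk x hx; rw [pvAnyDfs]; exact hx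
  | cons d ds ihd =>
    intro hk x hx
    rw [pvAnyDfs]
    have hd := hdfs visited d hk
    split_ifs with h1 h2
    · exact hd x hx
    · exact ihd (pvDfsA univ g meas param visited d).2
        (Nat.lt_of_le_of_lt (pvUnvisited_le univ visited _ hd) hk) x (hd x hx)

-- the simulation: one worklist round trip equals one any()-scan of the recursion
theorem pvLoopB_eq_anyDfs (univ : List String) (g : List (String × List String))
    (meas param : List String) :
    ∀ (k : Nat) (visited deps rest : List String), pvUnvisited univ visited < k →
      pvLoopB univ g meas param (deps ++ rest) visited =
        ((pvAnyDfs univ g meas param visited deps).1 ||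
          pvLoopB univ g meas param rest (pvAnyDfs univ g meas param visited deps).2) := by
  intro k
  induction k using Nat.strong_induction_on with
  | _ k IH =>
  intro visited deps
  induction deps generalizing visited with
  | nil => intro rest hk; rw [pvAnyDfs]; simp
  | cons d ds ihd =>
    intro rest hk
    have hlecons : pvUnvisited univ (d :: visited) < k :=
      Nat.lt_of_le_of_lt
        (pvUnvisited_le univ visited _ (fun x hx => List.mem_cons_of_mem _ hx)) hk
    rw [List.cons_append, pvLoopB, pvAnyDfs, pvDfsA]
    simp only [List.contains_eq_mem, decide_eq_true_eq]
    by_cases h1 : d ∈ visited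
    · simp only [if_pos h1]
      rw [dif_pos (fun x hx => hx)]
      simpa using ihd visited rest hk
    · simp only [if_neg h1]
      by_cases h2 : d ∈ meas
      · simp only [if_pos h2]; simp
      · simp only [if_neg h2]
        by_cases h3 : d ∈ param
        · simp only [if_pos h3]
          rw [dif_pos (fun x hx => List.mem_cons_of_mem _ hx)]
          simpa using ihd (d :: visited) rest hlecons
        · simp only [if_neg h3]
          by_cases h4 : d ∈ univ
          · simp only [dif_pos h4]
            have hlt : pvUnvisited univ (d :: visited) < pvUnvisited univ visited :=
              pvUnvisited_lt univ visited d h4 h1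
            have hmain := IH (pvUnvisited univ visited) hk (d :: visited)
              (pvGetDeps g d) (ds ++ rest) hlt
            rw [hmain]
            set r1 := pvAnyDfs univ g meas param (d :: visited) (pvGetDeps g d) with hr1
            have hsub1 : ∀ x, x ∈ d :: visited → x ∈ r1.2 := fun x hx =>
              pvAnyDfs_subset univ g meas param (pvUnvisited univ visited)
                (d :: visited) (pvGetDeps g d) hlt x hx
            have hlt2 : pvUnvisited univ r1.2 < pvUnvisited univ visited :=
              Nat.lt_of_le_of_lt (pvUnvisited_le univ (d :: visited) r1.2 hsub1) hlt
            by_cases hb : r1.1 = true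
            · rw [if_pos hb, hb]; simp
            · have hb' : r1.1 = false := by simpa using hb
              rw [if_neg hb, dif_pos (fun x hx => hsub1 x (List.mem_cons_of_mem _ hx)), hb']
              simpa using IH (pvUnvisited univ visited) hk r1.2 ds rest hlt2
          · simp only [dif_neg h4]
            rw [dif_pos (fun x hx => List.mem_cons_of_mem _ hx)]
            simpa using ihd (d :: visited) rest hlecons

-- the first component of a one-element any()-scan is the dfs result
theorem pvAnyDfs_single (univ : List String) (g : List (String × List String))
    (meas param visited : List String) (u : String) :
    (pvAnyDfs univ g meas param visited [u]).1 = (pvDfsA univ g meas param visited u).1 := by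
  rw [pvAnyDfs]
  split_ifs with h1 h2
  · simp [h1]
  · rw [pvAnyDfs]; simp [h1]
  · simp [h1]

-- ===== VERDICT (by name: the statement is the Claim_ definition above) =====
theorem depends_on_measurement_py_spec : Claim_equal_depends_on_measurement_py := by
  intro value_uuid dependency_graph measurement_uuids parameter_uuids derived_from_measurement _
  unfold Spec_depends_on_measurement_py depends_on_measurement_py depends_on_measurement_py_alt
  split_ifs with h1 h2 h3
  · rfl
  · rfl
  · rfl
  · have hmain := pvLoopB_eq_anyDfs (pvUniv value_uuid dependency_graph) dependency_graph
      measurement_uuids parameter_uuids (pvUnvisited (pvUniv value_uuid dependency_graph) [] + 1)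
      [] [value_uuid] [] (Nat.lt_succ_self _)
    rw [List.append_nil] at hmain
    rw [hmain, pvLoopB, pvAnyDfs_single]
    simp
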